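-- pv_equiv track=rewrite | github.com/wherby/code | algorithm/dp/stateDp/顺序无关的二进制DP/快速构建顺序无关的二进制空间.py | maximizeXorAndXor
-- ===== SOURCE A (Python) =====
-- from typing import List, Tuple, Optional
--
-- class XorBasis:
--     def __init__(self, n: int):
--         self.b = [0] * n
--
--     def insert(self, x: int) -> None:
--         b = self.b
--         for i in range(len(b) - 1, -1, -1):
--             if x >> i & 1:
--                 if b[i] == 0:
--                     b[i] = x
--                     return
--                 x ^= b[i]
--
--     def max_xor(self) -> int:
--         b = self.b
--         res = 0
--         for i in range(len(b) - 1, -1, -1):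
--             if res ^ b[i] > res:
--                 res ^= b[i]
--         return res
--
-- def maximizeXorAndXor(nums: List[int]) -> int:
--     n = len(nums)
--     sz= max(nums).bit_length()
--
--     u= 1<< n
--     sub_add =[0]*u
--     sub_xor = [0]*u
--     sub_add[0] = -1
--
--     for i,a in enumerate(nums):
--         hibit = 1<<i
--         for mask in range(hibit):
--             sub_add[mask | hibit] = sub_add[mask] & a
--             sub_xor[mask | hibit] = sub_xor[mask] ^a
--     sub_add[0] = 0
--
--     def max_xor2(sub):
--         b = XorBasis(sz)
--         xor = sub_xor[sub]
--         for i,a in enumerate(nums):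
--             if sub>>i &1:
--                 b.insert(a& ~xor)
--         return b.max_xor() *2 +xor
--     return max(sub_add[i] + max_xor2((u-1)^i) for i in range(u))
-- ===== SOURCE B (Python) =====
-- def maximizeXorAndXor(nums):
--     n = len(nums)
--     sz = max(nums).bit_length()
--     best = None
--     for m in range(1 << n):
--         keep = [a for j, a in enumerate(nums) if m >> j & 1]
--         rest = [a for j, a in enumerate(nums) if not (m >> j & 1)]
--         add = 0
--         if keep:
--             add = -1
--             for a in keep:
--                 add &= a
--         xor = 0
--         for a in rest:
--             xor ^= a
--         basis = [0] * sz
--         for a in rest: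
--             x = a & ~xor
--             for k in range(sz - 1, -1, -1):
--                 if x >> k & 1:
--                     if basis[k] == 0:
--                         basis[k] = x
--                         break
--                     x ^= basis[k]
--         res = 0
--         for k in range(sz - 1, -1, -1):
--             if res ^ basis[k] > res:
--                 res ^= basis[k]
--         v = add + 2 * res + xor
--         if best is None or v > best:
--             best = v
--     return best
-- ===== Notes on version B (the rewrite author's own statement) =====
-- stated objective: alternative
-- what changed: Replaces A's O(2^n)-space subset-DP tables sub_add/sub_xor (built by doubling passes, then indexed) with a direct per-subset recomputation: for each mask B partitions nums into keep/rest lists by bit tests and folds AND, XOR and the xor-basis over those lists, tracking a running best instead of max() over a generator; Pre_ excludes only the empty list, on which max(nums) raises in both.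
import Mathlib
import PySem

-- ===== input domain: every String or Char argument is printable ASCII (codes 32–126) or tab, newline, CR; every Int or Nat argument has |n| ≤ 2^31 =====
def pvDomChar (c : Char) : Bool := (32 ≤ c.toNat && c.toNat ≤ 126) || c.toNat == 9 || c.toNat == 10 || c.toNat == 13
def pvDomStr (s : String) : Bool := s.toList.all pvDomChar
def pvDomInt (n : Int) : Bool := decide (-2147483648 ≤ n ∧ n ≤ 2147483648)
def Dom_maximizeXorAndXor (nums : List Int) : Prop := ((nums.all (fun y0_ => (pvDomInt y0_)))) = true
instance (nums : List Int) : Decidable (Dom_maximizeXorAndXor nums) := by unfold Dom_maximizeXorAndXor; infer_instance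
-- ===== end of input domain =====

-- B removes the two subset-DP tables (sub_add/sub_xor) and recomputes each subset's AND/XOR/basis
-- by scanning nums per subset: an alternative decomposition of the same exponential search.


-- ===== PORT A =====
-- XorBasis.insert: countdown over indices len(b)-1 .. 0 (first argument is "one past" the next index).
def xbInsert : Nat → List Int → Int → List Int
  | 0, b, _ => b
  | i+1, b, x =>
    if PySem.Int.band (x >>> i) 1 = 1 then
      (if b.getD i 0 = 0 then b.set i x
       else xbInsert i b (PySem.Int.bxor x (b.getD i 0)))
    else xbInsert i b x

-- XorBasis.max_xor: countdown over indices len(b)-1 .. 0.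
def xbMaxXor : Nat → List Int → Int → Int
  | 0, _, res => res
  | i+1, b, res =>
      xbMaxXor i b (if PySem.Int.bxor res (b.getD i 0) > res then PySem.Int.bxor res (b.getD i 0) else res)

-- inner loop "for mask in range(hibit)" of A's table construction (masks are Nat: hibit = 1<<i ≥ 0,
-- and mask | hibit on Nat is exact for Python's | on these nonnegative ints)
def buildStep (a : Int) (i : Nat) (p : List Int × List Int) : List Int × List Int :=
  (List.range (2^i)).foldl (fun q mask =>
    (q.1.set (mask ||| 2^i) (PySem.Int.band (q.1.getD mask 0) a),
     q.2.set (mask ||| 2^i) (PySem.Int.bxor (q.2.getD mask 0) a))) p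

-- outer loop "for i,a in enumerate(nums)" carrying (sub_add, sub_xor)
def buildLoop : List Int → Nat → List Int × List Int → List Int × List Int
  | [], _, p => p
  | a :: t, i, p => buildLoop t (i+1) (buildStep a i p)

-- "for i,a in enumerate(nums): if sub>>i & 1: b.insert(a & ~xor)"  (sub ≥ 0, so Nat >>/& are exact)
def insLoop (sz : Nat) (xr : Int) : List Int → Nat → Nat → List Int → List Int
  | [], _, _, b => b
  | a :: t, j, sub, b =>
      insLoop sz xr t (j+1) sub
        (if (sub >>> j) &&& 1 = 1 then xbInsert sz b (PySem.Int.band a (Int.not xr)) else b)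

def maximizeXorAndXor (nums : List Int) : Int :=
  let n := nums.length
  let sz := PySem.Int.bitLength ((PySem.List.max? nums (fun x => x)).getD 0)  -- max(nums): raises on [] (see Pre_)
  let u := 2^n
  let p := buildLoop nums 0 ((List.replicate u (0:Int)).set 0 (-1), List.replicate u (0:Int))
  let subAdd := p.1.set 0 0
  let subXor := p.2
  let maxXor2 : Nat → Int := fun sub =>
    let xr := subXor.getD sub 0
    xbMaxXor sz (insLoop sz xr nums 0 sub (List.replicate sz 0)) 0 * 2 + xr
  (PySem.List.max? ((List.range u).map (fun i => subAdd.getD i 0 + maxXor2 ((u-1) ^^^ i))) (fun x => x)).getD 0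

-- ===== PORT B =====
-- B's inline basis-insert loop (for k in range(sz-1,-1,-1) with break)
def altInsert : Nat → List Int → Int → List Int
  | 0, basis, _ => basis
  | k+1, basis, x =>
      if PySem.Int.band (x >>> k) 1 = 1 then
        (if basis.getD k 0 = 0 then basis.set k x
         else altInsert k basis (PySem.Int.bxor x (basis.getD k 0)))
      else altInsert k basis x

-- B's inline running-max loop over the basis
def altMaxXor : Nat → List Int → Int → Int
  | 0, _, res => res
  | k+1, basis, res =>
      altMaxXor k basis (if PySem.Int.bxor res (basis.getD k 0) > res then PySem.Int.bxor res (basis.getD k 0) else res)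

-- body of B's loop over subsets m: partition nums by the bits of m, then aggregate each side directly
def subsetVal (nums : List Int) (sz : Nat) (m : Nat) : Int :=
  let keep := (nums.zipIdx.filter (fun p => (m >>> p.2) &&& 1 == 1)).map Prod.fst
  let rest := (nums.zipIdx.filter (fun p => !((m >>> p.2) &&& 1 == 1))).map Prod.fst
  let add := if keep = [] then 0 else keep.foldl (fun s a => PySem.Int.band s a) (-1)
  let xr := rest.foldl (fun s a => PySem.Int.bxor s a) 0
  let basis := rest.foldl (fun b a => altInsert sz b (PySem.Int.band a (Int.not xr))) (List.replicate sz (0:Int))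
  add + 2 * altMaxXor sz basis 0 + xr

def maximizeXorAndXor_alt (nums : List Int) : Int :=
  let sz := PySem.Int.bitLength ((PySem.List.max? nums (fun x => x)).getD 0)  -- max(nums): raises on [] (see Pre_)
  ((List.range (2^nums.length)).foldl (fun best m =>
      match best with
      | none => some (subsetVal nums sz m)
      | some b => some (if subsetVal nums sz m > b then subsetVal nums sz m else b)) none).getD 0

-- ===== PRECONDITION & SPEC =====
-- Pre_ excludes only the empty list, on which Python's max(nums) raises ValueError.
def Pre_maximizeXorAndXor (nums : List Int) : Prop := nums ≠ []
instance (nums : List Int) : Decidable (Pre_maximizeXorAndXor nums) := by unfold Pre_maximizeXorAndXor; infer_instance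
def pvWitness_maximizeXorAndXor : List Int := [2, 5]

def Spec_maximizeXorAndXor (nums : List Int) (out : Int) : Prop := out = maximizeXorAndXor_alt nums
instance (nums : List Int) (out : Int) : Decidable (Spec_maximizeXorAndXor nums out) := by unfold Spec_maximizeXorAndXor; infer_instance

-- ===== CLAIM (what is proved, stated in full; the proofs are below) =====
def Claim_equal_maximizeXorAndXor : Prop := ∀ (nums : List Int), Dom_maximizeXorAndXor nums → Pre_maximizeXorAndXor nums → Spec_maximizeXorAndXor nums (maximizeXorAndXor nums)

-- ===== LEMMAS AND PROOFS =====

-- generic "fold over the elements selected / rejected by the bits of m"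
def gFold {β : Type} (g : β → Int → β) : List Int → Nat → β → β
  | [], _, acc => acc
  | a :: t, m, acc => gFold g t (m / 2) (if m % 2 = 1 then g acc a else acc)

def gFoldN {β : Type} (g : β → Int → β) : List Int → Nat → β → β
  | [], _, acc => acc
  | a :: t, m, acc => gFoldN g t (m / 2) (if m % 2 = 1 then acc else g acc a)

theorem witness_ok : Dom_maximizeXorAndXor pvWitness_maximizeXorAndXor ∧ Pre_maximizeXorAndXor pvWitness_maximizeXorAndXor := by
  constructor <;> decide

-- getD/set bookkeeping
theorem getD_set_self (xs : List Int) (n : Nat) (h : n < xs.length) (v : Int) :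
    (xs.set n v).getD n 0 = v := by
  simp [List.getD_eq_getElem?_getD, h]

theorem getD_set_ne (xs : List Int) (n m : Nat) (h : n ≠ m) (v : Int) :
    (xs.set n v).getD m 0 = xs.getD m 0 := by
  simp [List.getD_eq_getElem?_getD, h]

-- the two basis helpers are the same recursion
theorem altInsert_eq (i : Nat) (b : List Int) (x : Int) : altInsert i b x = xbInsert i b x := by
  induction i generalizing b x with
  | zero => rfl
  | succ k ih => simp only [altInsert, xbInsert, ih]

theorem altMaxXor_eq (i : Nat) (b : List Int) (r : Int) : altMaxXor i b r = xbMaxXor i b r := by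
  induction i generalizing r with
  | zero => rfl
  | succ k ih => simp only [altMaxXor, xbMaxXor, ih]

theorem insLoop_eq_gFold (sz : Nat) (xr : Int) (t : List Int) (j sub : Nat) (b : List Int) :
    insLoop sz xr t j sub b
      = gFold (fun b a => xbInsert sz b (PySem.Int.band a (Int.not xr))) t (sub >>> j) b := by
  induction t generalizing j b with
  | nil => rfl
  | cons a t ih =>
    simp only [insLoop, gFold, ih, Nat.shiftRight_succ, Nat.and_one_is_mod]

-- keep/rest folds are gFold / gFoldN
theorem keep_foldl {β : Type} (g : β → Int → β) (t : List Int) (m s : Nat) (acc : β) :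
    ((t.zipIdx s |>.filter (fun p => (m >>> p.2) &&& 1 == 1)).map Prod.fst).foldl g acc
      = gFold g t (m >>> s) acc := by
  induction t generalizing s acc with
  | nil => rfl
  | cons a t ih =>
    have hms : (m >>> s) &&& 1 = (m >>> s) % 2 := Nat.and_one_is_mod _
    have hsucc : m >>> (s+1) = (m >>> s) / 2 := Nat.shiftRight_succ m s
    simp only [Nat.and_one_is_mod] at ih
    simp only [List.zipIdx_cons, List.filter_cons, gFold, hms]
    by_cases hc : (m >>> s) % 2 = 1
    · simp [hc, ← hsucc, ih]
    · simp [hc, ← hsucc, ih]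

theorem rest_foldl {β : Type} (g : β → Int → β) (t : List Int) (m s : Nat) (acc : β) :
    ((t.zipIdx s |>.filter (fun p => !((m >>> p.2) &&& 1 == 1))).map Prod.fst).foldl g acc
      = gFoldN g t (m >>> s) acc := by
  induction t generalizing s acc with
  | nil => rfl
  | cons a t ih =>
    have hms : (m >>> s) &&& 1 = (m >>> s) % 2 := Nat.and_one_is_mod _
    have hsucc : m >>> (s+1) = (m >>> s) / 2 := Nat.shiftRight_succ m s
    simp only [Nat.and_one_is_mod] at ih
    simp only [List.zipIdx_cons, List.filter_cons, gFoldN, hms]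
    by_cases hc : (m >>> s) % 2 = 1
    · simp [hc, ← hsucc, ih]
    · simp [hc, ← hsucc, ih]

theorem xor_mod_two (a b : Nat) : (a ^^^ b) % 2 = (a % 2 + b % 2) % 2 := by
  have h := Nat.and_xor_distrib_right (a := a) (b := b) (c := 1)
  rw [Nat.and_one_is_mod, Nat.and_one_is_mod, Nat.and_one_is_mod] at h
  rw [h]
  rcases Nat.mod_two_eq_zero_or_one a with ha | ha <;> rcases Nat.mod_two_eq_zero_or_one b with hb | hb <;>
    rw [Nat.add_mod, ha, hb] <;> decide

theorem gFold_compl {β : Type} (g : β → Int → β) (t : List Int) (m : Nat) (acc : β)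
    (h : m < 2^t.length) :
    gFold g t ((2^t.length - 1) ^^^ m) acc = gFoldN g t m acc := by
  induction t generalizing m acc with
  | nil => rfl
  | cons a t ih =>
    have h2 : (0:Nat) < 2 ^ t.length := Nat.two_pow_pos _
    have hlen : (2:Nat) ^ (a :: t).length = 2 * 2 ^ t.length := by
      simp [List.length_cons, pow_succ, Nat.mul_comm]
    have hdiv : ((2 ^ (a :: t).length - 1) ^^^ m) / 2 = (2 ^ t.length - 1) ^^^ (m / 2) := by
      rw [← Nat.shiftRight_one ((2 ^ (a :: t).length - 1) ^^^ m), Nat.shiftRight_xor_distrib,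
        Nat.shiftRight_one, Nat.shiftRight_one]
      congr 1
      omega
    have hmod : ((2 ^ (a :: t).length - 1) ^^^ m) % 2 = (1 + m % 2) % 2 := by
      rw [xor_mod_two]
      congr 2
      omega
    have hm2 : m / 2 < 2 ^ t.length := by
      rw [hlen] at h
      omega
    simp only [gFold, gFoldN, hdiv, hmod]
    rcases Nat.mod_two_eq_zero_or_one m with hp | hp <;> simp [hp, ih _ _ hm2]

-- keep is empty iff no selected bit
theorem keep_eq_nil_iff (t : List Int) (m s : Nat) :
    ((t.zipIdx s |>.filter (fun p => (m >>> p.2) &&& 1 == 1)).map Prod.fst) = []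
      ↔ (m >>> s) % 2^t.length = 0 := by
  induction t generalizing s with
  | nil => simp [Nat.mod_one]
  | cons a t ih =>
    have hms : (m >>> s) &&& 1 = (m >>> s) % 2 := Nat.and_one_is_mod _
    have hmm : m >>> s % 2 ^ (t.length + 1) = 0
        ↔ (m >>> s % 2 = 0 ∧ m >>> (s+1) % 2 ^ t.length = 0) := by
      rw [Nat.shiftRight_succ, pow_succ, Nat.mul_comm, Nat.mod_mul]
      omega
    simp only [Nat.and_one_is_mod] at ih
    simp only [List.zipIdx_cons, List.filter_cons, List.length_cons, hms, hmm]
    by_cases hc : (m >>> s) % 2 = 1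
    · simp [hc]
    · have hm : m >>> s % 2 = 0 := by omega
      simp [hm, ih]

-- buildStep: one element's pass writes exactly the band [2^i, 2^(i+1)) of each array
theorem lor_two_pow : ∀ (i k : Nat), k < 2^i → k ||| 2^i = 2^i + k := by
  intro i
  induction i with
  | zero =>
    intro k h
    interval_cases k
    decide
  | succ i ih =>
    intro k h
    have hp : (2:Nat)^(i+1) = 2*2^i := by rw [pow_succ]; omega
    have hd : (k ||| 2^(i+1)) / 2 = 2^i + k/2 := by
      rw [Nat.or_div_two]
      have h' : (2:Nat)^(i+1)/2 = 2^i := by omega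
      rw [h', ih (k/2) (by omega)]
    have hm : (k ||| 2^(i+1)) % 2 = k % 2 := by
      have h' := Nat.and_or_distrib_right k (2^(i+1)) 1
      rw [Nat.and_one_is_mod, Nat.and_one_is_mod, Nat.and_one_is_mod] at h'
      have he : (2:Nat)^(i+1) % 2 = 0 := by omega
      rw [h', he]
      rcases Nat.mod_two_eq_zero_or_one k with h'' | h'' <;> rw [h''] <;> decide
    omega

theorem buildStep_aux (a : Int) (i : Nat) (p : List Int × List Int)
    (h1 : 2^(i+1) ≤ p.1.length) (h2 : p.2.length = p.1.length) :
    ∀ k, k ≤ 2^i →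
    (((List.range k).foldl (fun q mask =>
        (q.1.set (mask ||| 2^i) (PySem.Int.band (q.1.getD mask 0) a),
         q.2.set (mask ||| 2^i) (PySem.Int.bxor (q.2.getD mask 0) a))) p).1.length = p.1.length ∧
     ((List.range k).foldl (fun q mask =>
        (q.1.set (mask ||| 2^i) (PySem.Int.band (q.1.getD mask 0) a),
         q.2.set (mask ||| 2^i) (PySem.Int.bxor (q.2.getD mask 0) a))) p).2.length = p.1.length) ∧
    ∀ m, m < p.1.length →
      (((List.range k).foldl (fun q mask =>
        (q.1.set (mask ||| 2^i) (PySem.Int.band (q.1.getD mask 0) a),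
         q.2.set (mask ||| 2^i) (PySem.Int.bxor (q.2.getD mask 0) a))) p).1.getD m 0
        = if 2^i ≤ m ∧ m < 2^i + k then PySem.Int.band (p.1.getD (m - 2^i) 0) a else p.1.getD m 0) ∧
      (((List.range k).foldl (fun q mask =>
        (q.1.set (mask ||| 2^i) (PySem.Int.band (q.1.getD mask 0) a),
         q.2.set (mask ||| 2^i) (PySem.Int.bxor (q.2.getD mask 0) a))) p).2.getD m 0
        = if 2^i ≤ m ∧ m < 2^i + k then PySem.Int.bxor (p.2.getD (m - 2^i) 0) a else p.2.getD m 0) := by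
  intro k
  induction k with
  | zero =>
    intro _
    refine ⟨⟨rfl, h2⟩, ?_⟩
    intro m hm
    simp only [List.range_zero, List.foldl_nil]
    constructor <;> rw [if_neg (by omega)]
  | succ k ih =>
    intro hk
    obtain ⟨⟨hL1, hL2⟩, hval⟩ := ih (by omega)
    rw [List.range_succ, List.foldl_append, List.foldl_cons, List.foldl_nil]
    set q := ((List.range k).foldl (fun q mask =>
        (q.1.set (mask ||| 2^i) (PySem.Int.band (q.1.getD mask 0) a),
         q.2.set (mask ||| 2^i) (PySem.Int.bxor (q.2.getD mask 0) a))) p) with hq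
    have hpow : (2:Nat)^(i+1) = 2*2^i := by rw [pow_succ]; omega
    have hor : k ||| 2^i = 2^i + k := lor_two_pow i k (by omega)
    have hq1k : q.1.getD k 0 = p.1.getD k 0 := by
      rw [(hval k (by omega)).1, if_neg (by omega)]
    have hq2k : q.2.getD k 0 = p.2.getD k 0 := by
      rw [(hval k (by omega)).2, if_neg (by omega)]
    refine ⟨⟨by simp [List.length_set, hL1], by simp [List.length_set, hL2]⟩, ?_⟩
    intro m hm
    constructor
    · show (q.1.set (k ||| 2^i) (PySem.Int.band (q.1.getD k 0) a)).getD m 0 = _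
      rw [hor, hq1k]
      by_cases hmk : m = 2^i + k
      · subst hmk
        rw [getD_set_self _ _ (by rw [hL1]; omega) _, if_pos (by omega)]
        have he : 2^i + k - 2^i = k := by omega
        rw [he]
      · rw [getD_set_ne _ _ _ (by omega) _, (hval m hm).1]
        split_ifs <;> first | rfl | omega
    · show (q.2.set (k ||| 2^i) (PySem.Int.bxor (q.2.getD k 0) a)).getD m 0 = _
      rw [hor, hq2k]
      by_cases hmk : m = 2^i + k
      · subst hmk
        rw [getD_set_self _ _ (by rw [hL2]; omega) _, if_pos (by omega)]
        have he : 2^i + k - 2^i = k := by omega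
        rw [he]
      · rw [getD_set_ne _ _ _ (by omega) _, (hval m hm).2]
        split_ifs <;> first | rfl | omega

theorem buildStep_spec (a : Int) (i : Nat) (p : List Int × List Int)
    (h1 : 2^(i+1) ≤ p.1.length) (h2 : p.2.length = p.1.length) :
    ((buildStep a i p).1.length = p.1.length ∧ (buildStep a i p).2.length = p.1.length) ∧
    ∀ m, m < p.1.length →
      ((buildStep a i p).1.getD m 0
        = if 2^i ≤ m ∧ m < 2^(i+1) then PySem.Int.band (p.1.getD (m - 2^i) 0) a else p.1.getD m 0) ∧
      ((buildStep a i p).2.getD m 0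
        = if 2^i ≤ m ∧ m < 2^(i+1) then PySem.Int.bxor (p.2.getD (m - 2^i) 0) a else p.2.getD m 0) := by
  obtain ⟨hL, hval⟩ := buildStep_aux a i p h1 h2 (2^i) (le_refl _)
  have hpow : (2:Nat)^(i+1) = 2*2^i := by rw [pow_succ]; omega
  refine ⟨hL, ?_⟩
  intro m hm
  obtain ⟨hv1, hv2⟩ := hval m hm
  constructor
  · rw [buildStep, hv1]
    split_ifs <;> first | rfl | omega
  · rw [buildStep, hv2]
    split_ifs <;> first | rfl | omega

-- buildLoop: the tables tabulate the direct per-subset folds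
theorem buildLoop_spec (t : List Int) (i : Nat) (p : List Int × List Int)
    (h1 : 2^(i + t.length) ≤ p.1.length) (h2 : p.2.length = p.1.length) :
    ((buildLoop t i p).1.length = p.1.length ∧ (buildLoop t i p).2.length = p.1.length) ∧
    ∀ m, m < 2^(i + t.length) →
      (buildLoop t i p).1.getD m 0 = gFold (fun s a => PySem.Int.band s a) t (m / 2^i) (p.1.getD (m % 2^i) 0) ∧
      (buildLoop t i p).2.getD m 0 = gFold (fun s a => PySem.Int.bxor s a) t (m / 2^i) (p.2.getD (m % 2^i) 0) := by
  induction t generalizing i p with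
  | nil =>
    refine ⟨⟨rfl, h2⟩, ?_⟩
    intro m hm
    simp only [List.length_nil, Nat.add_zero] at hm
    have h0 : m % 2^i = m := Nat.mod_eq_of_lt hm
    have h0' : m / 2^i = 0 := Nat.div_eq_of_lt hm
    simp [buildLoop, gFold, h0]
  | cons a t ihp =>
    have hme : i + (a :: t).length = (i+1) + t.length := by simp [List.length_cons]; omega
    have hp2 : (2:Nat)^(i+1) ≤ p.1.length := by
      have hexp : i + 1 ≤ i + (a :: t).length := by simp [List.length_cons]
      exact le_trans (Nat.pow_le_pow_right (by omega) hexp) h1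
    obtain ⟨⟨hs1, hs2⟩, hsv⟩ := buildStep_spec a i p hp2 h2
    obtain ⟨⟨hl1, hl2⟩, hlv⟩ := ihp (i+1) (buildStep a i p)
      (by rw [hs1, ← hme]; exact h1) (by rw [hs2, hs1])
    rw [hs1] at hl1 hl2
    refine ⟨⟨hl1, hl2⟩, ?_⟩
    intro m hm
    rw [hme] at hm
    obtain ⟨hv1, hv2⟩ := hlv m hm
    have hr : m % 2^(i+1) < 2^(i+1) := Nat.mod_lt _ (Nat.two_pow_pos _)
    obtain ⟨hr1, hr2⟩ := hsv (m % 2^(i+1)) (by omega)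
    have hpow : (2:Nat)^(i+1) = 2^i * 2 := by rw [pow_succ]
    have hmd : m % 2^i < 2^i := Nat.mod_lt _ (Nat.two_pow_pos _)
    have hmm : m % 2^(i+1) = m % 2^i + 2^i * ((m / 2^i) % 2) := by
      rw [hpow]
      exact Nat.mod_mul
    have hdd : m / 2^(i+1) = (m / 2^i) / 2 := by
      rw [hpow, ← Nat.div_div_eq_div_mul]
    simp only [buildLoop, gFold]
    rcases Nat.mod_two_eq_zero_or_one (m / 2^i) with hb | hb
    · rw [hb] at hmm
      have hrr : m % 2^(i+1) = m % 2^i := by omega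
      rw [hrr] at hr1 hr2 hv1 hv2
      rw [if_neg (by omega)] at hr1 hr2
      constructor
      · rw [hv1, hdd, hr1, if_neg (by omega)]
      · rw [hv2, hdd, hr2, if_neg (by omega)]
    · rw [hb] at hmm
      have hrr : m % 2^(i+1) = m % 2^i + 2^i := by omega
      rw [hrr] at hr1 hr2 hv1 hv2
      rw [if_pos (by constructor <;> omega)] at hr1 hr2
      have hsub : m % 2^i + 2^i - 2^i = m % 2^i := by omega
      rw [hsub] at hr1 hr2
      constructor
      · rw [hv1, hdd, hr1, if_pos hb]
      · rw [hv2, hdd, hr2, if_pos hb]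

-- the final Python max(...) versus B's running best
theorem max_fold_aux (g h : Nat → Int) : ∀ (l : List Nat) (c : Int), (∀ m ∈ l, h m = g m) →
    l.foldl (fun best m => match best with
      | none => some (g m)
      | some b => some (if g m > b then g m else b)) (some c)
      = some (l.foldl (fun acc m => max acc (h m)) c) := by
  intro l
  induction l with
  | nil => intro c _; rfl
  | cons x l ih =>
    intro c hc
    rw [List.foldl_cons, List.foldl_cons]
    have hx : h x = g x := hc x (by simp)
    have hmax : (if g x > c then g x else c) = max c (h x) := by
      rw [hx, max_def]
      split_ifs <;> omega
    simp only [hmax]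
    exact ih _ (fun m hm => hc m (by simp [hm]))

theorem max_fold (l : List Nat) (hne : l ≠ []) (h g : Nat → Int) (hc : ∀ m ∈ l, h m = g m) :
    (PySem.List.max? (l.map h) (fun y => y)).getD 0
      = (l.foldl (fun best m =>
          match best with
          | none => some (g m)
          | some b => some (if g m > b then g m else b)) none).getD 0 := by
  rcases l with _ | ⟨x, l⟩
  · contradiction
  · rw [List.map_cons, PySem.List.max?_id_cons, List.foldl_cons, List.foldl_map]
    show (some _).getD 0 = _
    have hinit : (match (none : Option Int) with
          | none => some (g x)
          | some b => some (if g x > b then g x else b)) = some (g x) := rfl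
    rw [hinit, max_fold_aux g h l (g x) (fun m hm => hc m (by simp [hm])), hc x (by simp)]

-- ===== VERDICT (by name: the statement is the Claim_ definition above) =====
theorem maximizeXorAndXor_spec : Claim_equal_maximizeXorAndXor := by
  intro nums _ hpre
  show maximizeXorAndXor nums = maximizeXorAndXor_alt nums
  unfold maximizeXorAndXor maximizeXorAndXor_alt
  dsimp only
  apply max_fold
  · simp only [ne_eq, List.range_eq_nil]
    exact (Nat.two_pow_pos _).ne'
  intro m hmem
  rw [List.mem_range] at hmem
  set n := nums.length with hn
  set sz := PySem.Int.bitLength ((PySem.List.max? nums fun x => x).getD 0) with hsz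
  set p0 := ((List.replicate (2 ^ n) (0:Int)).set 0 (-1), List.replicate (2 ^ n) (0:Int)) with hp0
  have hup := Nat.two_pow_pos n
  obtain ⟨⟨hB1, hB2⟩, hBv⟩ := buildLoop_spec nums 0 p0 (by simp [hp0, ← hn]) (by simp [hp0])
  have h01 : p0.1.getD 0 0 = -1 := by
    rw [hp0]
    exact getD_set_self _ 0 (by simp) _
  have h02 : p0.2.getD 0 0 = 0 := by simp [hp0]
  have hAddv : ∀ k, k < 2^n → (buildLoop nums 0 p0).1.getD k 0
      = gFold (fun s a => PySem.Int.band s a) nums k (-1) := by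
    intro k hk
    have h := (hBv k (by simpa [← hn] using hk)).1
    rwa [pow_zero, Nat.div_one, Nat.mod_one, h01] at h
  have hXorv : ∀ k, k < 2^n → (buildLoop nums 0 p0).2.getD k 0
      = gFold (fun s a => PySem.Int.bxor s a) nums k 0 := by
    intro k hk
    have h := (hBv k (by simpa [← hn] using hk)).2
    rwa [pow_zero, Nat.div_one, Nat.mod_one, h02] at h
  have hsubm : 2^n - 1 ^^^ m < 2^n := Nat.xor_lt_two_pow (by omega) hmem
  have hXA : (buildLoop nums 0 p0).2.getD (2^n - 1 ^^^ m) 0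
      = gFoldN (fun s a => PySem.Int.bxor s a) nums m 0 := by
    rw [hXorv _ hsubm]
    have h := gFold_compl (fun s a => PySem.Int.bxor s a) nums m 0 (by simpa [← hn] using hmem)
    simpa [← hn] using h
  rw [hXA]
  unfold subsetVal
  dsimp only
  have hXB : (((nums.zipIdx.filter fun p => !(m >>> p.2 &&& 1 == 1)).map Prod.fst).foldl
      (fun s a => PySem.Int.bxor s a) 0) = gFoldN (fun s a => PySem.Int.bxor s a) nums m 0 := by
    have h := rest_foldl (fun s a => PySem.Int.bxor s a) nums m 0 0
    simpa using h
  rw [hXB]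
  have hbasis : insLoop sz (gFoldN (fun s a => PySem.Int.bxor s a) nums m 0) nums 0 (2^n - 1 ^^^ m)
        (List.replicate sz 0)
      = ((nums.zipIdx.filter fun p => !(m >>> p.2 &&& 1 == 1)).map Prod.fst).foldl
          (fun b a => altInsert sz b (PySem.Int.band a
            (Int.not (gFoldN (fun s a => PySem.Int.bxor s a) nums m 0)))) (List.replicate sz 0) := by
    set X := gFoldN (fun s a => PySem.Int.bxor s a) nums m 0 with hX
    have h1 := insLoop_eq_gFold sz X nums 0 (2^n - 1 ^^^ m) (List.replicate sz 0)
    rw [Nat.shiftRight_zero] at h1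
    have h2 := gFold_compl (fun b a => xbInsert sz b (PySem.Int.band a (Int.not X))) nums m
      (List.replicate sz 0) (by simpa [← hn] using hmem)
    rw [← hn] at h2
    have h3 := rest_foldl (fun b a => altInsert sz b (PySem.Int.band a (Int.not X))) nums m 0
      (List.replicate sz 0)
    rw [Nat.shiftRight_zero] at h3
    have hfe : (fun (b : List Int) (a : Int) => altInsert sz b (PySem.Int.band a (Int.not X)))
        = (fun b a => xbInsert sz b (PySem.Int.band a (Int.not X))) := by
      funext b a
      rw [altInsert_eq]
    rw [h1, h3, hfe, h2]
  rw [hbasis, ← altMaxXor_eq]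
  by_cases hm0 : m = 0
  · subst hm0
    have hk0 : ((nums.zipIdx.filter fun p => ((0:Nat) >>> p.2 &&& 1 == 1)).map Prod.fst) = [] :=
      (keep_eq_nil_iff nums 0 0).mpr (by simp)
    rw [hk0]
    have hA0 : ((buildLoop nums 0 p0).1.set 0 0).getD 0 0 = 0 :=
      getD_set_self _ 0 (by rw [hB1, hp0]; simp) _
    rw [hA0, if_pos rfl]
    ring
  · rw [getD_set_ne _ _ _ (Ne.symm hm0), hAddv m hmem]
    have hkne : ¬ ((nums.zipIdx.filter fun p => (m >>> p.2 &&& 1 == 1)).map Prod.fst) = [] := by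
      intro hcon
      rw [keep_eq_nil_iff] at hcon
      rw [Nat.shiftRight_zero, ← hn, Nat.mod_eq_of_lt hmem] at hcon
      exact hm0 hcon
    rw [if_neg hkne]
    have hkf := keep_foldl (fun s a => PySem.Int.band s a) nums m 0 (-1)
    rw [Nat.shiftRight_zero] at hkf
    rw [hkf]
    ring
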